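-- pv_equiv track=rewrite | github.com/RomeroBarata/nlp_p1 | feature_extractors/feature_extraction.py | document_features
-- ===== SOURCE A (Python) =====
-- def document_features(document, most_frequent_words):
--     ''' Function to extract the features from a document.
--         Args:
--               document: A list of words describing the document.
--               most_frequent_words: A list of the most frequent words (the features).
--     '''
--     features = {}
--     for word in most_frequent_words:
--         features.setdefault(word, 0)
--
--     for word in document:
--         if word.lower() in most_frequent_words:
--             features[word.lower()] += 1
--
--     return features
-- ===== SOURCE B (Python) =====
-- def document_features(document, most_frequent_words):
--     ''' Count, for each feature word, how often it occurs (case-insensitively) in the document. '''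
--     counts = {}
--     for w in document:
--         lw = w.lower()
--         counts[lw] = counts.get(lw, 0) + 1
--     return {w: counts.get(w, 0) for w in most_frequent_words}
-- ===== Notes on version B (the rewrite author's own statement) =====
-- stated objective: faster
-- what changed: Replaces A's per-document-word membership scan of most_frequent_words by building a frequency table of lowercased document words once and then looking each feature word up in it.
import Mathlib
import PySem

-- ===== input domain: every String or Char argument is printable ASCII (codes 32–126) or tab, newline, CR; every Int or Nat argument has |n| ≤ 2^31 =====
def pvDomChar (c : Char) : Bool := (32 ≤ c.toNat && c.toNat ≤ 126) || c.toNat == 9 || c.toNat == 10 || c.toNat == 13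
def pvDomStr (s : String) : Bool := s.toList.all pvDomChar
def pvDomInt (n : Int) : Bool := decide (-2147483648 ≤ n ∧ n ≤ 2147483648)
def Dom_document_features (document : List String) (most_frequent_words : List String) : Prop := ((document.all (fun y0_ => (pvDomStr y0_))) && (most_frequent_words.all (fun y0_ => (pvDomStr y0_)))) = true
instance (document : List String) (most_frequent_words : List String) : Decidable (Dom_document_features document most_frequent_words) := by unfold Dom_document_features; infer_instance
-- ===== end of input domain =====

-- B builds a frequency table of the lowercased document words once and then looks each feature word up in it, instead of A's per-word membership scan of most_frequent_words.


-- ===== PORT A =====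
-- Port of A: seed a dict with the feature words via setdefault, then scan the document,
-- incrementing the entry of word.lower() when it is a member of most_frequent_words.
def document_features (document : List String) (most_frequent_words : List String) : List (String × Int) :=
  let features0 : PySem.Dict String Int :=
    most_frequent_words.foldl (fun d w => d.setdefault w 0) PySem.Dict.empty
  let features : PySem.Dict String Int :=
    document.foldl (fun d w =>
      if most_frequent_words.contains (PySem.Str.lower w) then
        d.modify (PySem.Str.lower w) 0 (· + 1)
      else d) features0
  features.items

-- ===== PORT B =====
-- Port of B: build a frequency table of the lowercased document words once,
-- then shape the result by looking each feature word up (default 0).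
def document_features_alt (document : List String) (most_frequent_words : List String) : List (String × Int) :=
  let counts : PySem.Dict String Int :=
    document.foldl (fun d w =>
      let lw := PySem.Str.lower w
      d.insert lw (d.getD lw 0 + 1)) PySem.Dict.empty
  (most_frequent_words.foldl (fun d w => d.insert w (counts.getD w 0)) PySem.Dict.empty).items

-- ===== PRECONDITION & SPEC =====
def Spec_document_features (document : List String) (most_frequent_words : List String) (out : List (String × Int)) : Prop := out = document_features_alt document most_frequent_words
instance (document : List String) (most_frequent_words : List String) (out : List (String × Int)) : Decidable (Spec_document_features document most_frequent_words out) := by unfold Spec_document_features; infer_instance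

-- ===== CLAIM (what is proved, stated in full; the proofs are below) =====
def Claim_equal_document_features : Prop := ∀ (document : List String) (most_frequent_words : List String), Dom_document_features document most_frequent_words → Spec_document_features document most_frequent_words (document_features document most_frequent_words)

-- ===== LEMMAS AND PROOFS =====

-- keys of A's setdefault seeding loop
theorem keys_setdefault_loop (l : List String) (d : PySem.Dict String Int) :
    (l.foldl (fun d w => d.setdefault w 0) d).keys = PySem.Set.update d.keys l := by
  induction l generalizing d with
  | nil => simp [PySem.Set.update_nil]
  | cons w t ih =>
    rw [List.foldl_cons, PySem.Set.update_cons, ih]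
    congr 1
    by_cases h : d.contains w = true
    · rw [PySem.Dict.setdefault_of_contains _ _ h]
      simp [PySem.Set.add, (PySem.Dict.contains_iff_mem_keys _ _).mp h]
    · rw [PySem.Dict.setdefault_of_not_contains _ _ (by simpa using h),
        PySem.Dict.keys_insert_of_not_contains _ _ (by simpa using h)]
      have hnm : w ∉ d.keys := fun hm => h ((PySem.Dict.contains_iff_mem_keys _ _).mpr hm)
      simp [PySem.Set.add, hnm]

-- getD with default 0 is unchanged by the setdefault seeding loop
theorem getD_setdefault_loop (l : List String) (d : PySem.Dict String Int) (k : String) :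
    (l.foldl (fun d w => d.setdefault w 0) d).getD k 0 = d.getD k 0 := by
  induction l generalizing d with
  | nil => rfl
  | cons w t ih =>
    rw [List.foldl_cons, ih]
    by_cases h : d.contains w = true
    · rw [PySem.Dict.setdefault_of_contains _ _ h]
    · rw [PySem.Dict.setdefault_of_not_contains _ _ (by simpa using h)]
      by_cases hk : k = w
      · subst hk
        rw [PySem.Dict.getD_insert_self, PySem.Dict.getD_of_not_contains _ _ (by simpa using h)]
      · rw [PySem.Dict.getD_insert_of_ne _ _ _ hk]

-- keys of A's counting loop: unchanged when every feature word is already a key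
theorem keys_count_loop (l mfw : List String) (d : PySem.Dict String Int)
    (h : ∀ x ∈ mfw, x ∈ d.keys) :
    (l.foldl (fun d w =>
      if mfw.contains (PySem.Str.lower w) then d.modify (PySem.Str.lower w) 0 (· + 1) else d)
      d).keys = d.keys := by
  induction l generalizing d with
  | nil => rfl
  | cons w t ih =>
    rw [List.foldl_cons]
    by_cases hc : mfw.contains (PySem.Str.lower w) = true
    · rw [if_pos hc]
      have hmem : (PySem.Str.lower w) ∈ d.keys := h _ (by simpa using hc)
      have hk : (d.modify (PySem.Str.lower w) 0 (· + 1)).keys = d.keys := by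
        rw [PySem.Dict.keys_modify,
          PySem.Dict.keys_insert_of_contains _ _ ((PySem.Dict.contains_iff_mem_keys _ _).mpr hmem)]
      rw [ih _ (fun x hx => hk ▸ h x hx), hk]
    · rw [if_neg hc, ih _ h]

-- value at a feature word after A's counting loop
theorem getD_count_loop (l mfw : List String) (k : String)
    (hk : mfw.contains k = true) (d : PySem.Dict String Int) :
    (l.foldl (fun d w =>
      if mfw.contains (PySem.Str.lower w) then d.modify (PySem.Str.lower w) 0 (· + 1) else d)
      d).getD k 0 = d.getD k 0 + ((l.map PySem.Str.lower).count k : Int) := by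
  induction l generalizing d with
  | nil => simp
  | cons w t ih =>
    rw [List.foldl_cons, List.map_cons, List.count_cons]
    by_cases he : PySem.Str.lower w = k
    · subst he
      rw [if_pos hk, ih, PySem.Dict.getD_modify_self]
      push_cast
      simp; ring
    · have hbe : (PySem.Str.lower w == k) = false := by simpa using he
      rw [hbe]
      by_cases hc : mfw.contains (PySem.Str.lower w) = true
      · rw [if_pos hc, ih, PySem.Dict.getD_modify_of_ne _ _ _ (fun h => he h.symm)]
        simp
      · rw [if_neg hc, ih]; simp

-- items of B's shaping loop over the feature words
theorem items_shape_loop (mfw : List String) (counts : PySem.Dict String Int)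
    (s : List String) (d : PySem.Dict String Int)
    (hd : d.items = s.map (fun k => (k, counts.getD k 0))) :
    (mfw.foldl (fun d w => d.insert w (counts.getD w 0)) d).items
      = (PySem.Set.update s mfw).map (fun k => (k, counts.getD k 0)) := by
  induction mfw generalizing s d with
  | nil => simpa [PySem.Set.update_nil] using hd
  | cons w t ih =>
    rw [List.foldl_cons, PySem.Set.update_cons]
    have hkeys : d.keys = s := by
      simp [PySem.Dict.keys, hd, Function.comp_def]
    by_cases hm : w ∈ s
    · have hc : d.contains w = true :=
        (PySem.Dict.contains_iff_mem_keys _ _).mpr (hkeys ▸ hm)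
      refine ih (PySem.Set.add s w) _ ?_
      rw [PySem.Dict.items_insert_of_contains _ _ hc, hd, List.map_map]
      have hadd : PySem.Set.add s w = s := by
        simp [PySem.Set.add, hm]
      rw [hadd]
      refine List.map_congr_left (fun k _ => ?_)
      simp only [Function.comp]
      by_cases hkw : k = w
      · subst hkw; simp
      · simp [hkw]
    · have hc : d.contains w = false := by
        rcases h' : d.contains w with _ | _
        · rfl
        · exact absurd (hkeys ▸ (PySem.Dict.contains_iff_mem_keys d w).mp h') hm
      refine ih (PySem.Set.add s w) _ ?_
      rw [PySem.Dict.items_insert_of_not_contains _ _ hc, hd]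
      simp [PySem.Set.add, hm]

-- ===== VERDICT (by name: the statement is the Claim_ definition above) =====
theorem document_features_spec : Claim_equal_document_features := by
  intro document mfw _hdom
  unfold Spec_document_features document_features document_features_alt
  simp only []
  -- A side
  have hkeys0 : (mfw.foldl (fun d w => d.setdefault w 0)
      (PySem.Dict.empty : PySem.Dict String Int)).keys = PySem.Set.ofList mfw := by
    rw [keys_setdefault_loop, PySem.Dict.keys_empty, PySem.Set.update_nil_left]
  have hkeysA : (document.foldl (fun d w =>
      if mfw.contains (PySem.Str.lower w) then d.modify (PySem.Str.lower w) 0 (· + 1) else d)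
      (mfw.foldl (fun d w => d.setdefault w 0)
        (PySem.Dict.empty : PySem.Dict String Int))).keys = PySem.Set.ofList mfw := by
    rw [keys_count_loop _ mfw _
      (fun x hx => by rw [hkeys0]; exact (PySem.Set.mem_ofList _ _).mpr hx), hkeys0]
  have hitemsA : (document.foldl (fun d w =>
      if mfw.contains (PySem.Str.lower w) then d.modify (PySem.Str.lower w) 0 (· + 1) else d)
      (mfw.foldl (fun d w => d.setdefault w 0)
        (PySem.Dict.empty : PySem.Dict String Int))).items
      = (PySem.Set.ofList mfw).map (fun k =>
          (k, ((document.map PySem.Str.lower).count k : Int))) := by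
    rw [PySem.Dict.items_eq_map_keys _ (hkeysA ▸ PySem.Set.nodup_ofList mfw) 0, hkeysA]
    refine List.map_congr_left (fun k hkm => ?_)
    have hkc : mfw.contains k = true := by
      simpa using (PySem.Set.mem_ofList _ _).mp hkm
    rw [getD_count_loop _ _ _ hkc, getD_setdefault_loop, PySem.Dict.getD_empty, zero_add]
  -- B side
  have hgetB : ∀ k, (document.foldl (fun d w =>
      d.insert (PySem.Str.lower w) (d.getD (PySem.Str.lower w) 0 + 1))
      (PySem.Dict.empty : PySem.Dict String Int)).getD k 0
      = ((document.map PySem.Str.lower).count k : Int) := by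
    intro k
    rw [← List.foldl_map (f := PySem.Str.lower)
      (g := fun (d : PySem.Dict String Int) x => d.insert x (d.getD x 0 + 1)),
      PySem.Dict.getD_foldl_insert_add_one, PySem.Dict.getD_empty, zero_add]
  rw [hitemsA, items_shape_loop mfw _ [] PySem.Dict.empty (by rfl),
    PySem.Set.update_nil_left]
  exact List.map_congr_left (fun k _ => by rw [hgetB])
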